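-- pv_equiv track=rewrite | github.com/xidchen/mednlp | mednlp/kg/brat_test_accurary.py | _dict_add_two
-- ===== SOURCE A (Python) =====
-- def _dict_add_two(data_list, dict_need):
--     if data_list:
--         for dt_txt in data_list:
--             # for dt in dt_txt:
--             key = dt_txt[0]
--             # print key
--             if key in dict_need:
--                 dict_need[key] += 1
--             else:
--                 pass
--     else:
--         pass
--     return dict_need
-- ===== SOURCE B (Python) =====
-- def _dict_add_two(data_list, dict_need):
--     counts = {}
--     for dt_txt in (data_list or ()):
--         k = dt_txt[0]
--         counts[k] = counts.get(k, 0) + 1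
--     for key in dict_need:
--         dict_need[key] += counts.get(key, 0)
--     return dict_need
-- ===== Notes on version B (the rewrite author's own statement) =====
-- stated objective: idiomatic
-- what changed: Instead of scanning data_list and testing membership/incrementing dict_need per element, B builds a frequency table of first elements in one pass and then adds counts.get(key, 0) to every existing key of dict_need; the Lean Pre_ only requires the association list standing for the Python dict dict_need to have distinct keys (a real dict always does).
import Mathlib
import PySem

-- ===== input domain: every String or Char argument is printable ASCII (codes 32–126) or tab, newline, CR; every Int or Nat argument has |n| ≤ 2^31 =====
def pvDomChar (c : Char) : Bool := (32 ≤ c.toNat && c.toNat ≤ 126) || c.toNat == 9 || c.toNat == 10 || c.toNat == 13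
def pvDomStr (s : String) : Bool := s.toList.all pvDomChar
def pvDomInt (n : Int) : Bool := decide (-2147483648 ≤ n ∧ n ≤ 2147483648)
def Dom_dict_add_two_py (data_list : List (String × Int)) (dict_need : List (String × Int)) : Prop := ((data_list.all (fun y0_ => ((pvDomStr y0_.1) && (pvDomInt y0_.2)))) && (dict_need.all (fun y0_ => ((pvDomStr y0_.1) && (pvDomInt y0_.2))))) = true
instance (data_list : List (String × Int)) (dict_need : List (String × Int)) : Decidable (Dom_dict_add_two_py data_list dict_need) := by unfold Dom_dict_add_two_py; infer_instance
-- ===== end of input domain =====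

-- B replaces A's per-element membership-test-and-increment over data_list by a counts-then-merge
-- pass (build a frequency table of first elements, then add counts.get(key, 0) to each existing
-- key of dict_need), for idiomatic clarity; A mutates dict_need in place, the equivalence proved
-- here is about the RETURN value only.

-- ===== PORT A =====
def dict_add_two_py (data_list : List (String × Int)) (dict_need : List (String × Int)) : List (String × Int) :=
  if data_list.isEmpty then dict_need
  else
    (data_list.foldl
      (fun d dt_txt =>
        if d.contains dt_txt.1 then d.modify dt_txt.1 0 (· + 1) else d)
      (PySem.Dict.mk dict_need)).items

-- ===== PORT B =====
def dict_add_two_py_alt (data_list : List (String × Int)) (dict_need : List (String × Int)) : List (String × Int) :=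
  let counts : PySem.Dict String Int :=
    data_list.foldl (fun c dt_txt => c.insert dt_txt.1 (c.getD dt_txt.1 0 + 1)) PySem.Dict.empty
  dict_need.map (fun p => (p.1, p.2 + counts.getD p.1 0))

-- ===== PRECONDITION & SPEC =====
-- Pre_ only requires the association list standing for the Python dict dict_need to have distinct
-- keys: a Python dict always does, so no Python-reachable input is excluded.
def Pre_dict_add_two_py (data_list : List (String × Int)) (dict_need : List (String × Int)) : Prop :=
  (dict_need.map Prod.fst).Nodup
instance (data_list : List (String × Int)) (dict_need : List (String × Int)) : Decidable (Pre_dict_add_two_py data_list dict_need) := by unfold Pre_dict_add_two_py; infer_instance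

def pvWitness_dict_add_two_py : (List (String × Int)) × (List (String × Int)) :=
  ([("a", 1), ("b", 2), ("a", 3)], [("a", 5), ("c", 0)])

def Spec_dict_add_two_py (data_list : List (String × Int)) (dict_need : List (String × Int)) (out : List (String × Int)) : Prop := out = dict_add_two_py_alt data_list dict_need
instance (data_list : List (String × Int)) (dict_need : List (String × Int)) (out : List (String × Int)) : Decidable (Spec_dict_add_two_py data_list dict_need out) := by unfold Spec_dict_add_two_py; infer_instance

-- ===== CLAIM (what is proved, stated in full; the proofs are below) =====
def Claim_equal_dict_add_two_py : Prop := ∀ (data_list : List (String × Int)) (dict_need : List (String × Int)), Dom_dict_add_two_py data_list dict_need → Pre_dict_add_two_py data_list dict_need → Spec_dict_add_two_py data_list dict_need (dict_add_two_py data_list dict_need)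

-- ===== LEMMAS AND PROOFS =====

-- A's loop body, named for the lemmas.
def pvStepA (d : PySem.Dict String Int) (dt_txt : String × Int) : PySem.Dict String Int :=
  if d.contains dt_txt.1 then d.modify dt_txt.1 0 (· + 1) else d

theorem pvStepA_keys (d : PySem.Dict String Int) (x : String × Int) :
    (pvStepA d x).keys = d.keys := by
  unfold pvStepA; split_ifs with h
  · simp [PySem.Dict.keys_modify, PySem.Dict.keys_insert_of_contains, h]
  · rfl

theorem pvFoldA_keys (l : List (String × Int)) (d : PySem.Dict String Int) :
    (l.foldl pvStepA d).keys = d.keys := by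
  induction l generalizing d with
  | nil => rfl
  | cons x l ih => simp [List.foldl_cons, ih, pvStepA_keys]

theorem pvStepA_getD (d : PySem.Dict String Int) (x : String × Int) (k : String) :
    (pvStepA d x).getD k 0 =
      d.getD k 0 + (if d.contains k ∧ k = x.1 then 1 else 0) := by
  unfold pvStepA
  by_cases hc : d.contains x.1 = true
  · simp only [hc, if_true]
    rw [PySem.Dict.getD_modify]
    by_cases hk : k = x.1
    · subst hk; simp [hc]
    · simp [hk]
  · simp only [hc, if_false]
    by_cases hk : k = x.1
    · subst hk; simp [hc]
    · simp [hk]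

theorem pvStepA_contains (d : PySem.Dict String Int) (x : String × Int) (k : String) :
    (pvStepA d x).contains k = d.contains k := by
  unfold pvStepA; split_ifs with h
  · simp [PySem.Dict.contains_modify]
    intro hk; rw [hk]; exact h
  · rfl

theorem pvFoldA_getD (l : List (String × Int)) (d : PySem.Dict String Int) (k : String) :
    (l.foldl pvStepA d).getD k 0 =
      d.getD k 0 + (if d.contains k then ((l.map Prod.fst).count k : Int) else 0) := by
  induction l generalizing d with
  | nil => simp
  | cons x l ih =>
    rw [List.foldl_cons, ih, pvStepA_getD, pvStepA_contains]
    by_cases hc : d.contains k = true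
    · simp only [hc, true_and, if_true]
      by_cases hk : k = x.1
      · subst hk
        rw [List.map_cons, List.count_cons]
        simp; ring
      · rw [List.map_cons, List.count_cons]
        have : (x.1 == k) = false := by simp [Ne.symm hk]
        simp [this, hk]
    · simp [hc]

theorem pvFoldA_nodup (l : List (String × Int)) (d : PySem.Dict String Int)
    (h : d.keys.Nodup) : (l.foldl pvStepA d).keys.Nodup := by
  rw [pvFoldA_keys]; exact h

-- ===== VERDICT (by name: the statement is the Claim_ definition above) =====
theorem dict_add_two_py_spec : Claim_equal_dict_add_two_py := by
  intro data_list dict_need _ hpre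
  unfold Spec_dict_add_two_py dict_add_two_py dict_add_two_py_alt
  have hcnt : ∀ k : String,
      (data_list.foldl (fun c dt_txt => c.insert dt_txt.1 (c.getD dt_txt.1 0 + 1))
        (PySem.Dict.empty : PySem.Dict String Int)).getD k 0
        = ((data_list.map Prod.fst).count k : Int) := by
    intro k
    rw [← List.foldl_map (f := Prod.fst)
      (g := fun c x => PySem.Dict.insert c x (PySem.Dict.getD c x 0 + 1))]
    rw [PySem.Dict.getD_foldl_insert_add_one]
    simp
  by_cases he : data_list.isEmpty
  · rw [List.isEmpty_iff] at he
    subst he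
    simp only [List.isEmpty_nil, if_true, List.foldl_nil]
    simp
  · simp only [he, Bool.false_eq_true, if_false]
    -- dict through the fold, as PySem.Dict
    set d0 : PySem.Dict String Int := PySem.Dict.mk dict_need with hd0
    have hkeys0 : d0.keys = dict_need.map Prod.fst := rfl
    have hnd0 : d0.keys.Nodup := by rw [hkeys0]; exact hpre
    have hres := pvFoldA_nodup data_list d0 hnd0
    have hitems := PySem.Dict.items_eq_map_keys (data_list.foldl pvStepA d0) hres (0 : Int)
    have hfold : data_list.foldl
        (fun d dt_txt => if d.contains dt_txt.1 then d.modify dt_txt.1 0 (· + 1) else d) d0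
        = data_list.foldl pvStepA d0 := rfl
    rw [hfold, hitems, pvFoldA_keys, hkeys0, List.map_map]
    refine List.map_congr_left ?_
    intro p hp
    have hmem : (p.1, p.2) ∈ d0.items := by simpa using hp
    have hget : d0.getD p.1 0 = p.2 := PySem.Dict.getD_of_mem_items d0 hmem hnd0 0
    have hcont : d0.contains p.1 = true := by
      rw [PySem.Dict.contains_iff_mem_keys, hkeys0]
      exact List.mem_map_of_mem hp
    simp only [Function.comp]
    rw [pvFoldA_getD, hget, hcont, hcnt p.1]
    simp
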